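-- pv_equiv track=rewrite | github.com/PieroM97/Computer-Vision-Chess | MyChessFunction.py | computer_white_move
-- ===== SOURCE A (Python) =====
-- def computer_white_move(move,oldblack):
--     matrix_chessboard = [["h1", "g1", "f1", "e1", "d1", "c1", "b1", "a1"],
--                          ["h2", "g2", "f2", "e2", "d2", "c2", "b2", "a2"],
--                          ["h3", "g3", "f3", "e3", "d3", "c3", "b3", "a3"],
--                          ["h4", "g4", "f4", "e4", "d4", "c4", "b4", "a4"],
--                          ["h5", "g5", "f5", "e5", "d5", "c5", "b5", "a5"],
--                          ["h6", "g6", "f6", "e6", "d6", "c6", "b6", "a6"],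
--                          ["h7", "g7", "f7", "e7", "d7", "c7", "b7", "a7"],
--                          ["h8", "g8", "f8", "e8", "d8", "c8", "b8", "a8"]]
--
--
--     move_matrix = [[0,0,0,0,0,0,0,0],
--      [0,0,0,0,0,0,0,0],
--      [0,0,0,0,0,0,0,0],
--      [0,0,0,0,0,0,0,0],
--      [0,0,0,0,0,0,0,0],
--      [0,0,0,0,0,0,0,0],
--      [0,0,0,0,0,0,0,0],
--      [0,0,0,0,0,0,0,0]]
--
--     da,a = parse_move(move)
--
--     for x in range(8):
--         for y in range(8):
--             if( da == matrix_chessboard[x][y] ) :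
--                 move_matrix[x][y] = 1
--
--             if( a == matrix_chessboard[x][y] ) :
--                 move_matrix[x][y] = -1
--
--     for x in range(8):
--         for y in range(8):
--             if(move_matrix[x][y] == -1 and oldblack[x][y] == 1):
--                 oldblack[x][y] = 0
--
--     return oldblack
--
-- def parse_move(move):
--
--     da = move[0]+move[1]
--     a = move[2]+move[3]
--
--     return da,a
-- ===== SOURCE B (Python) =====
-- def computer_white_move(move, oldblack):
--     # Destination square is move[2]+move[3]; compute board indices directly.
--     x = ord(move[3]) - ord('1')
--     y = ord('h') - ord(move[2])
--     if 0 <= x < 8 and 0 <= y < 8 and oldblack[x][y] == 1: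
--         oldblack[x][y] = 0
--     return oldblack
-- ===== Notes on version B (the rewrite author's own statement) =====
-- stated objective: simpler
-- what changed: B drops the move_matrix scaffold and both 64-cell scans: it decodes the destination square from move[2]/move[3] with ord() arithmetic, bounds-checks it, and clears at most that single cell in place.
import Mathlib
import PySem

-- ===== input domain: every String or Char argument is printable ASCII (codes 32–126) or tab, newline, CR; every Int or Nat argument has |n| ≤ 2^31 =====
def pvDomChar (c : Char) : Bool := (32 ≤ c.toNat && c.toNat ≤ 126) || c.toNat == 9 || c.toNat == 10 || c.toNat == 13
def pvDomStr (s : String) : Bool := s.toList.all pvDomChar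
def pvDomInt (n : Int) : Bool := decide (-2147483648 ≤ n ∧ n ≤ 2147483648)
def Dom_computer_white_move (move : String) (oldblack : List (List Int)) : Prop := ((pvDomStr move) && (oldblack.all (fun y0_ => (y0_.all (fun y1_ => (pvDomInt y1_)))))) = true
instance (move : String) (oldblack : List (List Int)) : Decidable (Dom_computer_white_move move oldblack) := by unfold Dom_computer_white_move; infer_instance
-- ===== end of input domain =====

-- B drops A's 64-cell board scans and move_matrix: it decodes the destination square
-- arithmetically from move[2], move[3] and clears at most that one cell (simpler; return
-- value only — both Pythons mutate oldblack in place identically).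

-- ===== PORT A =====
-- strings are modelled as List Char throughout (PySem convention for char-level work)
def pvMCB : List (List (List Char)) :=
  [[['h','1'], ['g','1'], ['f','1'], ['e','1'], ['d','1'], ['c','1'], ['b','1'], ['a','1']],
   [['h','2'], ['g','2'], ['f','2'], ['e','2'], ['d','2'], ['c','2'], ['b','2'], ['a','2']],
   [['h','3'], ['g','3'], ['f','3'], ['e','3'], ['d','3'], ['c','3'], ['b','3'], ['a','3']],
   [['h','4'], ['g','4'], ['f','4'], ['e','4'], ['d','4'], ['c','4'], ['b','4'], ['a','4']],
   [['h','5'], ['g','5'], ['f','5'], ['e','5'], ['d','5'], ['c','5'], ['b','5'], ['a','5']],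
   [['h','6'], ['g','6'], ['f','6'], ['e','6'], ['d','6'], ['c','6'], ['b','6'], ['a','6']],
   [['h','7'], ['g','7'], ['f','7'], ['e','7'], ['d','7'], ['c','7'], ['b','7'], ['a','7']],
   [['h','8'], ['g','8'], ['f','8'], ['e','8'], ['d','8'], ['c','8'], ['b','8'], ['a','8']]]

def pvInitMM : List (List Int) :=
  [[0,0,0,0,0,0,0,0],[0,0,0,0,0,0,0,0],[0,0,0,0,0,0,0,0],[0,0,0,0,0,0,0,0],
   [0,0,0,0,0,0,0,0],[0,0,0,0,0,0,0,0],[0,0,0,0,0,0,0,0],[0,0,0,0,0,0,0,0]]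

-- move_matrix[x][y] = v  (x, y are in range in A, so plain List.set)
def pvSet2 (m : List (List Int)) (x y : Nat) (v : Int) : List (List Int) :=
  m.set x ((m.getD x []).set y v)

def pvCell (x y : Nat) : List Char := (pvMCB.getD x []).getD y []

-- first double loop of A: build move_matrix from da and a
def pvMoveMatrix (da a : List Char) : List (List Int) :=
  (List.range 8).foldl (fun mm x =>
    (List.range 8).foldl (fun mm y =>
      let mm1 := if da = pvCell x y then pvSet2 mm x y 1 else mm
      if a = pvCell x y then pvSet2 mm1 x y (-1) else mm1) mm) pvInitMM

-- second double loop of A: clear captured black pieces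
def pvApplyMM (mm ob : List (List Int)) : List (List Int) :=
  (List.range 8).foldl (fun ob x =>
    (List.range 8).foldl (fun ob y =>
      if ((mm.getD x []).getD y 0) = -1 then
        match ob[x]? with
        | some row =>
          match row[y]? with
          | some v => if v = 1 then ob.set x (row.set y 0) else ob
          | none => ob          -- Python raises IndexError here; excluded by Pre_
        | none => ob            -- Python raises IndexError here; excluded by Pre_
      else ob) ob) ob

def computer_white_move (move : String) (oldblack : List (List Int)) : List (List Int) :=
  match (move.toList)[0]?, (move.toList)[1]?, (move.toList)[2]?, (move.toList)[3]? with
  | some m0, some m1, some m2, some m3 =>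
      pvApplyMM (pvMoveMatrix [m0, m1] [m2, m3]) oldblack
  | _, _, _, _ => oldblack      -- Python raises IndexError in parse_move; excluded by Pre_

-- ===== PORT B =====
def computer_white_move_alt (move : String) (oldblack : List (List Int)) : List (List Int) :=
  match (move.toList)[3]? with
  | none => oldblack            -- Python raises IndexError here; excluded by Pre_
  | some r =>
    match (move.toList)[2]? with
    | none => oldblack          -- unreachable when move[3] exists
    | some l =>
      let x : Int := (r.toNat : Int) - 49       -- ord(move[3]) - ord('1')
      let y : Int := 104 - (l.toNat : Int)      -- ord('h') - ord(move[2])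
      if 0 ≤ x ∧ x < 8 ∧ 0 ≤ y ∧ y < 8 then
        match PySem.List.pyGet? oldblack x with
        | none => oldblack      -- Python raises IndexError here; excluded by Pre_
        | some row =>
          match PySem.List.pyGet? row y with
          | none => oldblack    -- Python raises IndexError here; excluded by Pre_
          | some v => if v = 1 then oldblack.set x.toNat (row.set y.toNat 0) else oldblack
      else oldblack

-- ===== PRECONDITION & SPEC =====
-- Pre_ excludes exactly the inputs where A raises IndexError: move shorter than 4
-- characters, or a valid destination square whose cell lies outside oldblack's shape.
def Pre_computer_white_move (move : String) (oldblack : List (List Int)) : Prop :=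
  4 ≤ move.toList.length ∧
  ((97 ≤ (move.toList.getD 2 ' ').toNat ∧ (move.toList.getD 2 ' ').toNat ≤ 104 ∧
    49 ≤ (move.toList.getD 3 ' ').toNat ∧ (move.toList.getD 3 ' ').toNat ≤ 56) →
    (move.toList.getD 3 ' ').toNat - 49 < oldblack.length ∧
    104 - (move.toList.getD 2 ' ').toNat <
      (oldblack.getD ((move.toList.getD 3 ' ').toNat - 49) []).length)

instance (move : String) (oldblack : List (List Int)) : Decidable (Pre_computer_white_move move oldblack) := by
  unfold Pre_computer_white_move; infer_instance

def pvWitness_computer_white_move : String × List (List Int) :=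
  ("a2a4",
   [[0,0,0,0,0,0,0,0],[0,0,0,0,0,0,0,0],[0,0,0,0,0,0,0,0],[0,0,0,0,0,0,0,1],
    [0,0,0,0,0,0,0,0],[0,0,0,0,0,0,0,0],[0,0,0,0,0,0,0,0],[0,0,0,0,0,0,0,0]])

def Spec_computer_white_move (move : String) (oldblack : List (List Int)) (out : List (List Int)) : Prop := out = computer_white_move_alt move oldblack
instance (move : String) (oldblack : List (List Int)) (out : List (List Int)) : Decidable (Spec_computer_white_move move oldblack out) := by unfold Spec_computer_white_move; infer_instance

-- ===== CLAIM (what is proved, stated in full; the proofs are below) =====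
def Claim_equal_computer_white_move : Prop := ∀ (move : String) (oldblack : List (List Int)), Dom_computer_white_move move oldblack → Pre_computer_white_move move oldblack → Spec_computer_white_move move oldblack (computer_white_move move oldblack)

-- ===== LEMMAS AND PROOFS =====

def pvShape (m : List (List Int)) : Prop := m.length = 8 ∧ ∀ i < 8, (m.getD i []).length = 8

lemma pv_char_eq (c d : Char) : c = d ↔ c.toNat = d.toNat := by
  constructor
  · intro h; rw [h]
  · intro h; exact Char.ext (UInt32.toNat_inj.mp h)
lemma pv_cell_eq (c2 c3 : Char) (x y : Nat) (hx : x < 8) (hy : y < 8) :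
  ([c2,c3] = pvCell x y) ↔ (c2.toNat = 104 - y ∧ c3.toNat = 49 + x) := by
  interval_cases x <;> interval_cases y <;>
    simp [pvCell, pvMCB, pv_char_eq,
      (by decide : ('a':Char).toNat = 97), (by decide : ('b':Char).toNat = 98),
      (by decide : ('c':Char).toNat = 99), (by decide : ('d':Char).toNat = 100),
      (by decide : ('e':Char).toNat = 101), (by decide : ('f':Char).toNat = 102),
      (by decide : ('g':Char).toNat = 103), (by decide : ('h':Char).toNat = 104),
      (by decide : ('1':Char).toNat = 49), (by decide : ('2':Char).toNat = 50),
      (by decide : ('3':Char).toNat = 51), (by decide : ('4':Char).toNat = 52),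
      (by decide : ('5':Char).toNat = 53), (by decide : ('6':Char).toNat = 54),
      (by decide : ('7':Char).toNat = 55), (by decide : ('8':Char).toNat = 56)]

lemma pv_foldl_fix {α β : Type} (f : α → β → α) (l : List β) (s : α)
    (h : ∀ t b, b ∈ l → f t b = t) : l.foldl f s = s := by
  induction l generalizing s with
  | nil => rfl
  | cons a l ih =>
      rw [List.foldl_cons, h s a (by simp)]
      exact ih s (fun t b hb => h t b (by simp [hb]))

lemma pv_foldl_inv {α β γ : Type} (f : α → β → α) (l : List β) (s : α)
    (P : α → Prop) (g : α → γ)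
    (h : ∀ t b, b ∈ l → P t → P (f t b) ∧ g (f t b) = g t) (hs : P s) :
    P (l.foldl f s) ∧ g (l.foldl f s) = g s := by
  induction l generalizing s with
  | nil => exact ⟨hs, rfl⟩
  | cons a l ih =>
      obtain ⟨h1, h2⟩ := h s a (by simp) hs
      obtain ⟨h3, h4⟩ := ih (f s a) (fun t b hb ht => h t b (by simp [hb]) ht) h1
      exact ⟨h3, h4.trans h2⟩

lemma pv_getD_row_set {m : List (List Int)} {x i : Nat} {r : List Int} (hx : x < m.length) :
    (m.set x r).getD i [] = if i = x then r else m.getD i [] := by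
  by_cases h : i = x
  · subst h; simp [List.getD_eq_getElem?_getD, List.getElem?_set_self hx]
  · simp [List.getD_eq_getElem?_getD, List.getElem?_set_ne (Ne.symm h), h]

lemma pv_shape_set2 {m : List (List Int)} {x y : Nat} {v : Int} (hm : pvShape m) :
    pvShape (pvSet2 m x y v) := by
  obtain ⟨h1, h2⟩ := hm
  by_cases hx : x < 8
  · refine ⟨by simp [pvSet2, h1], fun i hi => ?_⟩
    rw [pvSet2, pv_getD_row_set (by omega)]
    by_cases h : i = x
    · simp only [h, if_pos trivial, List.length_set]
      exact h2 x hx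
    · simp only [if_neg h]
      exact h2 i hi
  · refine ⟨by simp [pvSet2, h1], fun i hi => ?_⟩
    rw [pvSet2, List.set_eq_of_length_le (by omega)]
    exact h2 i hi

lemma pv_s2_row_ne {m : List (List Int)} {x' x y : Nat} {v : Int} (hm : pvShape m)
    (hx' : x' < 8) (h : x' ≠ x) : (pvSet2 m x' y v).getD x [] = m.getD x [] := by
  have hl := hm.1
  rw [pvSet2, pv_getD_row_set (by omega)]
  simp [Ne.symm h]

lemma pv_s2_row_self {m : List (List Int)} {x y : Nat} {v : Int} (hm : pvShape m)
    (hx : x < 8) : (pvSet2 m x y v).getD x [] = (m.getD x []).set y v := by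
  have hl := hm.1
  rw [pvSet2, pv_getD_row_set (by omega)]
  simp

lemma pv_getD_set_self {l : List Int} {y : Nat} {v : Int} (hy : y < l.length) :
    (l.set y v).getD y 0 = v := by
  simp [List.getD_eq_getElem?_getD, List.getElem?_set_self hy]

lemma pv_getD_set_ne {l : List Int} {y' y : Nat} {v : Int} (h : y' ≠ y) :
    (l.set y' v).getD y 0 = l.getD y 0 := by
  simp [List.getD_eq_getElem?_getD, List.getElem?_set_ne h]

lemma pv_range8_split {x : Nat} (hx : x < 8) :
    List.range 8 = List.range' 0 x ++ x :: List.range' (x+1) (7-x) := by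
  rw [List.range_eq_range']
  have h1 : (8:Nat) = x + (7 - x + 1) := by omega
  rw [h1, ← List.range'_append_1, List.range'_succ]
  simp

-- step of the inner loop of the first double loop, at row x, column y
lemma pv_mm_inner_step_shape {da a : List Char} {x y : Nat} {mm : List (List Int)}
    (hm : pvShape mm) :
    pvShape ((fun mm y =>
      let mm1 := if da = pvCell x y then pvSet2 mm x y 1 else mm
      if a = pvCell x y then pvSet2 mm1 x y (-1) else mm1) mm y) := by
  dsimp only
  split <;> split <;> first
    | exact pv_shape_set2 (pv_shape_set2 hm)
    | exact pv_shape_set2 hm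
    | exact hm

lemma pv_mm_val (da a : List Char) (x y : Nat) (hx : x < 8) (hy : y < 8) :
    ((pvMoveMatrix da a).getD x []).getD y 0 =
      if a = pvCell x y then -1 else if da = pvCell x y then 1 else 0 := by
  unfold pvMoveMatrix
  set inner := fun (x : Nat) (mm : List (List Int)) (y : Nat) =>
      let mm1 := if da = pvCell x y then pvSet2 mm x y 1 else mm
      if a = pvCell x y then pvSet2 mm1 x y (-1) else mm1 with hinner
  set F := fun (mm : List (List Int)) (x' : Nat) => (List.range 8).foldl (inner x') mm with hF
  -- rows other than x preserve shape and row x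
  have hrows : ∀ (l : List Nat), (∀ b ∈ l, b < 8 ∧ b ≠ x) → ∀ s : List (List Int), pvShape s →
      pvShape (l.foldl F s) ∧
      (l.foldl F s).getD x [] = s.getD x [] := by
    intro l hl s hs
    simp only [hF]
    refine pv_foldl_inv _ _ _ pvShape (fun m => m.getD x []) ?_ hs
    intro t x' hx' ht
    obtain ⟨hx'8, hx'ne⟩ := hl x' hx'
    refine pv_foldl_inv _ _ _ pvShape (fun m => m.getD x []) ?_ ht
    intro t' y' _ ht'
    constructor
    · exact pv_mm_inner_step_shape ht'
    · show (inner x' t' y').getD x [] = t'.getD x []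
      simp only [hinner]
      split <;> split <;> first
        | rw [pv_s2_row_ne (pv_shape_set2 ht') hx'8 hx'ne, pv_s2_row_ne ht' hx'8 hx'ne]
        | rw [pv_s2_row_ne ht' hx'8 hx'ne]
        | rfl
  -- columns other than y (in row x) preserve shape and cell (x,y)
  have hcell_ne : ∀ (t' : List (List Int)) (y' : Nat), pvShape t' → y' ≠ y →
      ((inner x t' y').getD x []).getD y 0 = (t'.getD x []).getD y 0 := by
    intro t' y' ht' hy'ne
    simp only [hinner]
    split <;> split <;> first
      | rw [pv_s2_row_self (pv_shape_set2 ht') hx, pv_getD_set_ne hy'ne,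
            pv_s2_row_self ht' hx, pv_getD_set_ne hy'ne]
      | rw [pv_s2_row_self ht' hx, pv_getD_set_ne hy'ne]
      | rfl
  have hcols : ∀ (l : List Nat), (∀ b ∈ l, b ≠ y) → ∀ s : List (List Int), pvShape s →
      pvShape (l.foldl (inner x) s) ∧
      ((l.foldl (inner x) s).getD x []).getD y 0 = (s.getD x []).getD y 0 := by
    intro l hl s hs
    refine pv_foldl_inv _ _ _ pvShape (fun m => (m.getD x []).getD y 0) ?_ hs
    intro t y' hy' ht
    exact ⟨pv_mm_inner_step_shape ht, hcell_ne t y' ht (hl y' hy')⟩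
  -- split the outer fold at x
  rw [pv_range8_split hx, List.foldl_append, List.foldl_cons]
  have hinit : pvShape pvInitMM := by
    constructor
    · decide
    · decide
  obtain ⟨hs1, hs1row⟩ := hrows (List.range' 0 x)
    (fun b hb => by have := List.mem_range'_1.mp hb; omega) pvInitMM hinit
  set s1 := (List.range' 0 x).foldl F pvInitMM
  -- the middle row x : split the inner fold at y
  have h00 : ∀ x' < 8, ∀ y' < 8, ((pvInitMM.getD x' []).getD y' 0 : Int) = 0 := by decide
  have hs1cell : (s1.getD x []).getD y 0 = 0 := by
    rw [hs1row]; exact h00 x hx y hy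
  have hmid : pvShape (F s1 x) ∧
      ((F s1 x).getD x []).getD y 0 =
        (if a = pvCell x y then -1 else if da = pvCell x y then 1 else 0) := by
    simp only [hF]
    rw [pv_range8_split hy, List.foldl_append, List.foldl_cons]
    obtain ⟨hp1, hp1c⟩ := hcols (List.range' 0 y)
      (fun b hb => by have := List.mem_range'_1.mp hb; omega) s1 hs1
    set s2 := (List.range' 0 y).foldl (inner x) s1
    have hstep : pvShape (inner x s2 y) ∧
        ((inner x s2 y).getD x []).getD y 0 =
          (if a = pvCell x y then -1 else if da = pvCell x y then 1 else 0) := by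
      constructor
      · exact pv_mm_inner_step_shape hp1
      · have hrowlen : y < (s2.getD x []).length := by rw [hp1.2 x hx]; exact hy
        simp only [hinner]
        split <;> split <;> first
          | rw [pv_s2_row_self (pv_shape_set2 hp1) hx, pv_getD_set_self
                (by rw [pv_s2_row_self hp1 hx]; simpa using hrowlen)]
          | rw [pv_s2_row_self hp1 hx, pv_getD_set_self hrowlen]
          | rw [hp1c, hs1cell]
    obtain ⟨hq1, hq1c⟩ := hcols (List.range' (y+1) (7-y))
      (fun b hb => by have := List.mem_range'_1.mp hb; omega) (inner x s2 y) hstep.1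
    exact ⟨hq1, by rw [hq1c, hstep.2]⟩
  -- suffix rows x' > x preserve row x
  obtain ⟨_, hsufr⟩ := hrows (List.range' (x+1) (7-x))
    (fun b hb => by have := List.mem_range'_1.mp hb; omega) _ hmid.1
  rw [hsufr, hmid.2]

lemma pv_applyMM_id (mm ob : List (List Int))
    (h : ∀ x < 8, ∀ y < 8, ((mm.getD x []).getD y 0) ≠ -1) : pvApplyMM mm ob = ob := by
  unfold pvApplyMM
  apply pv_foldl_fix
  intro t x hxm
  apply pv_foldl_fix
  intro t' y hym
  rw [if_neg (h x (List.mem_range.mp hxm) y (List.mem_range.mp hym))]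

lemma pv_applyMM_single (mm ob : List (List Int)) (x0 y0 : Nat) (hx0 : x0 < 8) (hy0 : y0 < 8)
    (h : ∀ x < 8, ∀ y < 8, (((mm.getD x []).getD y 0) = -1 ↔ (x = x0 ∧ y = y0))) :
    pvApplyMM mm ob =
      (match ob[x0]? with
       | some row =>
         match row[y0]? with
         | some v => if v = 1 then ob.set x0 (row.set y0 0) else ob
         | none => ob
       | none => ob) := by
  unfold pvApplyMM
  set step := fun (x : Nat) (ob : List (List Int)) (y : Nat) =>
      if ((mm.getD x []).getD y 0) = -1 then
        match ob[x]? with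
        | some row =>
          match row[y]? with
          | some v => if v = 1 then ob.set x (row.set y 0) else ob
          | none => ob
        | none => ob
      else ob with hstep
  set G := fun (ob : List (List Int)) (x : Nat) => (List.range 8).foldl (step x) ob with hG
  have hrowid : ∀ (l : List Nat), (∀ b ∈ l, b < 8 ∧ b ≠ x0) → ∀ s : List (List Int),
      l.foldl G s = s := by
    intro l hl s
    apply pv_foldl_fix
    intro t x hxm
    simp only [hG]
    apply pv_foldl_fix
    intro t' y hym
    simp only [hstep]
    rw [if_neg]
    intro hc
    exact (hl x hxm).2 ((h x (hl x hxm).1 y (List.mem_range.mp hym)).mp hc).1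
  rw [pv_range8_split hx0, List.foldl_append, List.foldl_cons]
  rw [hrowid (List.range' 0 x0) (fun b hb => by have := List.mem_range'_1.mp hb; omega) ob]
  have hmid : G ob x0 =
      (match ob[x0]? with
       | some row =>
         match row[y0]? with
         | some v => if v = 1 then ob.set x0 (row.set y0 0) else ob
         | none => ob
       | none => ob) := by
    simp only [hG]
    rw [pv_range8_split hy0, List.foldl_append, List.foldl_cons]
    have hcolid : ∀ (l : List Nat), (∀ b ∈ l, b < 8 ∧ b ≠ y0) → ∀ s : List (List Int),
        l.foldl (step x0) s = s := by
      intro l hl s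
      apply pv_foldl_fix
      intro t y hym
      simp only [hstep]
      rw [if_neg]
      intro hc
      exact (hl y hym).2 ((h x0 hx0 y (hl y hym).1).mp hc).2
    rw [hcolid (List.range' 0 y0) (fun b hb => by have := List.mem_range'_1.mp hb; omega) ob]
    rw [hcolid (List.range' (y0+1) (7-y0)) (fun b hb => by have := List.mem_range'_1.mp hb; omega)]
    simp only [hstep]
    rw [if_pos ((h x0 hx0 y0 hy0).mpr ⟨rfl, rfl⟩)]
  rw [hrowid (List.range' (x0+1) (7-x0)) (fun b hb => by have := List.mem_range'_1.mp hb; omega)]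
  exact hmid


-- ===== VERDICT (by name: the statement is the Claim_ definition above) =====
theorem computer_white_move_spec : Claim_equal_computer_white_move := by
  intro move ob _ hpre
  unfold Spec_computer_white_move
  obtain ⟨hlen, hsh⟩ := hpre
  rcases hcs : move.toList with _ | ⟨m0, _ | ⟨m1, _ | ⟨m2, _ | ⟨m3, rest⟩⟩⟩⟩ <;>
    rw [hcs] at hlen <;> try simp at hlen
  rw [hcs] at hsh
  simp only [List.getD_cons_succ, List.getD_cons_zero] at hsh
  unfold computer_white_move computer_white_move_alt
  rw [hcs]
  simp only [List.getElem?_cons_zero, List.getElem?_cons_succ]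
  by_cases hv : 97 ≤ m2.toNat ∧ m2.toNat ≤ 104 ∧ 49 ≤ m3.toNat ∧ m3.toNat ≤ 56
  · -- valid destination square
    obtain ⟨hrlen, hclen⟩ := hsh hv
    set x0 : Nat := m3.toNat - 49 with hx0def
    set y0 : Nat := 104 - m2.toNat with hy0def
    have hx0 : x0 < 8 := by omega
    have hy0 : y0 < 8 := by omega
    set row := ob.getD x0 [] with hrowdef
    have hobx : ob[x0]? = some row := by
      simp [hrowdef, List.getD_eq_getElem?_getD, List.getElem?_eq_getElem hrlen]
    have hoby : row[y0]? = some (row.getD y0 0) := by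
      simp [List.getD_eq_getElem?_getD, List.getElem?_eq_getElem hclen]
    -- A's side: move_matrix has -1 exactly at (x0, y0)
    rw [pv_applyMM_single (pvMoveMatrix [m0, m1] [m2, m3]) ob x0 y0 hx0 hy0 ?hiff]
    case hiff =>
      intro x hx y hy
      rw [pv_mm_val _ _ x y hx hy]
      constructor
      · intro hc
        by_cases ha : [m2, m3] = pvCell x y
        · have := (pv_cell_eq m2 m3 x y hx hy).mp ha
          omega
        · rw [if_neg ha] at hc
          split at hc <;> omega
      · rintro ⟨rfl, rfl⟩
        rw [if_pos ((pv_cell_eq m2 m3 x0 y0 hx0 hy0).mpr (by omega))]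
    -- B's side: the bounds check passes and indexes the same cell
    have hXx : ((m3.toNat : Int) - 49) = ((x0 : Nat) : Int) := by omega
    have hYy : (104 - (m2.toNat : Int)) = ((y0 : Nat) : Int) := by omega
    rw [if_pos (by omega : (0:Int) ≤ (m3.toNat : Int) - 49 ∧ (m3.toNat : Int) - 49 < 8 ∧
          (0:Int) ≤ 104 - (m2.toNat : Int) ∧ 104 - (m2.toNat : Int) < 8)]
    rw [hXx, hYy]
    simp only [PySem.List.pyGet?_natCast, Int.toNat_natCast, hobx, hoby]
  · -- destination is not a board square: both sides leave oldblack unchanged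
    rw [pv_applyMM_id]
    · rw [if_neg (by omega : ¬ ((0:Int) ≤ (m3.toNat : Int) - 49 ∧ (m3.toNat : Int) - 49 < 8 ∧
            (0:Int) ≤ 104 - (m2.toNat : Int) ∧ 104 - (m2.toNat : Int) < 8))]
    · intro x hx y hy
      rw [pv_mm_val _ _ x y hx hy]
      by_cases ha : [m2, m3] = pvCell x y
      · have := (pv_cell_eq m2 m3 x y hx hy).mp ha
        omega
      · rw [if_neg ha]
        split <;> omega
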